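-- pv_equiv track=rewrite | github.com/kelvinhuang0327/number-pattern-research | lottery_api/models/multi_bet_optimizer.py | _ts3_cold_bet
-- ===== SOURCE A (Python) =====
-- from collections import Counter, defaultdict
-- from typing import List, Dict, Tuple, Set
--
-- def _ts3_cold_bet(history: List[Dict], max_num: int, exclude: Set[int] = None) -> List[int]:
--     """Strict TS3 Cold Numbers Logic (w=100)"""
--     exclude = exclude or set()
--     recent = history[-100:]
--     all_nums = [n for d in recent for n in d['numbers']]
--     freq = Counter(all_nums)
--     candidates = [n for n in range(1, max_num + 1) if n not in exclude]
--     sorted_cold = sorted(candidates, key=lambda x: freq.get(x, 0))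
--     return sorted(sorted_cold[:6])
-- ===== SOURCE B (Python) =====
-- from collections import Counter
--
--
-- def _ts3_cold_bet(history, max_num, exclude=None):
--     """Single-pass bounded selection of the 6 coldest numbers (w=100)."""
--     excluded = exclude or set()
--     freq = Counter(n for d in history[-100:] for n in d['numbers'])
--     best = []  # at most 6 (frequency, number) pairs, kept in ascending order
--     for n in range(1, max_num + 1):
--         if n in excluded:
--             continue
--         key = (freq.get(n, 0), n)
--         if len(best) < 6 or key < best[-1]:
--             i = 0
--             while i < len(best) and best[i] < key:
--                 i += 1
--             best.insert(i, key)
--             del best[6:]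
--     return sorted(num for _, num in best)
-- ===== Notes on version B (the rewrite author's own statement) =====
-- stated objective: alternative
-- what changed: Replaces A's full sort of all candidates followed by slicing with a single pass that maintains a bounded ordered buffer of the 6 coldest (frequency, number) pairs (truncated insertion selection).
import Mathlib
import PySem

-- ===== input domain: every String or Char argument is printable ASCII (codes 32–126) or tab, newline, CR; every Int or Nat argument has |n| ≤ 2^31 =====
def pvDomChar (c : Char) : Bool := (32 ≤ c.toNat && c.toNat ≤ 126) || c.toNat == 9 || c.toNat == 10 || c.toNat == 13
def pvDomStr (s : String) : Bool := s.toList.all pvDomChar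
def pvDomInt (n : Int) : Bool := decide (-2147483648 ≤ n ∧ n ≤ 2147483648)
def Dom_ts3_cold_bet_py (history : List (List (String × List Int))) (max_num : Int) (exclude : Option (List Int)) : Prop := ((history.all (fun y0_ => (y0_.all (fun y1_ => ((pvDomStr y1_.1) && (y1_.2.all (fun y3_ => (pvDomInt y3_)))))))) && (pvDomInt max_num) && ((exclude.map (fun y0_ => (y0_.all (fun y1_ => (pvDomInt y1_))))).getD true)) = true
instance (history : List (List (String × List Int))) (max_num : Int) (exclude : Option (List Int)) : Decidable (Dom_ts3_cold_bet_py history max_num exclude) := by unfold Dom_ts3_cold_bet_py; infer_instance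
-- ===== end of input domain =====

-- B replaces A's full sort-then-slice by a single pass keeping a bounded (≤6) ordered buffer of the coldest numbers; equivalence is about return values only (neither version mutates its arguments).

-- ===== PORT A =====
def ts3_cold_bet_py (history : List (List (String × List Int))) (max_num : Int) (exclude : Option (List Int)) : List Int :=
  -- exclude = exclude or set(): None and the empty set both become the empty set
  let excl : List Int := exclude.getD []
  let recent := PySem.List.slice history (some (-100)) none
  -- d['numbers']: Pre_ts3_cold_bet_py excludes a dict missing the key (KeyError)
  let all_nums : List Int := recent.flatMap (fun d => (PySem.Dict.mk d).getD "numbers" [])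
  let freq := PySem.Dict.counter all_nums
  let candidates := (PySem.List.pyRange 1 (max_num + 1) 1).filter (fun n => !(excl.contains n))
  let sorted_cold := PySem.List.sorted candidates (fun x => freq.getD x 0)
  PySem.List.sorted (PySem.List.slice sorted_cold none (some 6)) (fun x => x)

-- ===== PORT B =====
-- Python tuple comparison (f1, n1) < (f2, n2)
def pvLexLt (a b : Int × Int) : Bool := a.1 < b.1 || (a.1 == b.1 && a.2 < b.2)

-- the while-scan + list.insert of Source B: insert key after every smaller element
def pvInsAsc (key : Int × Int) : List (Int × Int) → List (Int × Int)
  | [] => [key]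
  | y :: ys => if pvLexLt y key then y :: pvInsAsc key ys else key :: y :: ys

def ts3_cold_bet_py_alt (history : List (List (String × List Int))) (max_num : Int) (exclude : Option (List Int)) : List Int :=
  let excl : List Int := exclude.getD []
  let freq := PySem.Dict.counter ((PySem.List.slice history (some (-100)) none).flatMap (fun d => (PySem.Dict.mk d).getD "numbers" []))
  let best := (PySem.List.pyRange 1 (max_num + 1) 1).foldl (fun best n =>
    if excl.contains n then best
    else
      -- key = (freq.get(n, 0), n); best[-1] is only read when len(best) = 6 > 0, so the pyGetD default is unreachable
      if best.length < 6 || pvLexLt (freq.getD n 0, n) (PySem.List.pyGetD best (-1) (0, 0)) then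
        (pvInsAsc (freq.getD n 0, n) best).take 6    -- best.insert(i, key); del best[6:]
      else best) []
  PySem.List.sorted (best.map (·.2)) (fun x => x)

-- ===== PRECONDITION & SPEC =====
-- Pre_ excludes exactly the inputs where A raises KeyError: a draw dict in the last-100 window without a 'numbers' key (B raises there too).
def Pre_ts3_cold_bet_py (history : List (List (String × List Int))) (max_num : Int) (exclude : Option (List Int)) : Prop :=
  ∀ d ∈ PySem.List.slice history (some (-100)) none, (PySem.Dict.mk d).contains "numbers" = true
instance (history : List (List (String × List Int))) (max_num : Int) (exclude : Option (List Int)) : Decidable (Pre_ts3_cold_bet_py history max_num exclude) := by unfold Pre_ts3_cold_bet_py; infer_instance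

def pvWitness_ts3_cold_bet_py : (List (List (String × List Int))) × Int × Option (List Int) :=
  ([[("numbers", [1, 2, 1])], [("numbers", [2])]], 6, some [3])

def Spec_ts3_cold_bet_py (history : List (List (String × List Int))) (max_num : Int) (exclude : Option (List Int)) (out : List Int) : Prop := out = ts3_cold_bet_py_alt history max_num exclude
instance (history : List (List (String × List Int))) (max_num : Int) (exclude : Option (List Int)) (out : List Int) : Decidable (Spec_ts3_cold_bet_py history max_num exclude out) := by unfold Spec_ts3_cold_bet_py; infer_instance

-- ===== CLAIM (what is proved, stated in full; the proofs are below) =====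
def Claim_equal_ts3_cold_bet_py : Prop := ∀ (history : List (List (String × List Int))) (max_num : Int) (exclude : Option (List Int)), Dom_ts3_cold_bet_py history max_num exclude → Pre_ts3_cold_bet_py history max_num exclude → Spec_ts3_cold_bet_py history max_num exclude (ts3_cold_bet_py history max_num exclude)

-- ===== LEMMAS AND PROOFS =====

theorem pvLexLt_trans {a b c : Int × Int} (h1 : pvLexLt a b = true) (h2 : pvLexLt b c = true) :
    pvLexLt a c = true := by
  obtain ⟨a1, a2⟩ := a; obtain ⟨b1, b2⟩ := b; obtain ⟨c1, c2⟩ := c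
  simp [pvLexLt] at *; omega

theorem pvLexLt_total {a b : Int × Int} (hne : a ≠ b) (h : pvLexLt a b = false) :
    pvLexLt b a = true := by
  obtain ⟨a1, a2⟩ := a; obtain ⟨b1, b2⟩ := b
  simp [pvLexLt, Prod.mk.injEq] at *; omega

theorem pvLexLt_asymm {a b : Int × Int} (h : pvLexLt a b = true) : pvLexLt b a = false := by
  obtain ⟨a1, a2⟩ := a; obtain ⟨b1, b2⟩ := b
  simp [pvLexLt] at *; omega

theorem pvInsAsc_eq_insertBy (key : Int × Int) (L : List (Int × Int))
    (h : ∀ y ∈ L, y ≠ key) :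
    pvInsAsc key L = PySem.List.insertBy pvLexLt key L := by
  induction L with
  | nil => simp [pvInsAsc, PySem.List.insertBy]
  | cons y ys ih =>
    by_cases hk : pvLexLt key y = true
    · have : pvLexLt y key = false := pvLexLt_asymm hk
      simp [pvInsAsc, PySem.List.insertBy, hk, this]
    · have hy : pvLexLt y key = true :=
        pvLexLt_total (fun e => h y (List.mem_cons_self ..) e.symm) (by simpa using hk)
      simp [pvInsAsc, PySem.List.insertBy, hk, hy]
      exact ih (fun z hz => h z (List.mem_cons_of_mem _ hz))

theorem pv_length_insertBy {α : Type} (bf : α → α → Bool) (x : α) (L : List α) :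
    (PySem.List.insertBy bf x L).length = L.length + 1 := by
  induction L with
  | nil => simp [PySem.List.insertBy]
  | cons y ys ih =>
    by_cases h : bf x y = true <;> simp [PySem.List.insertBy, h, ih]

theorem pv_insertBy_append_left {α : Type} (bf : α → α → Bool) (x : α) (A B : List α)
    (h : ∃ y ∈ A, bf x y = true) :
    PySem.List.insertBy bf x (A ++ B) = PySem.List.insertBy bf x A ++ B := by
  induction A with
  | nil => simp at h
  | cons y ys ih =>
    by_cases hy : bf x y = true
    · simp [PySem.List.insertBy, hy]
    · obtain ⟨z, hz, hbz⟩ := h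
      rcases List.mem_cons.mp hz with rfl | hz'
      · exact absurd hbz hy
      · simp [PySem.List.insertBy, hy, ih ⟨z, hz', hbz⟩]

theorem pv_insertBy_append_right {α : Type} (bf : α → α → Bool) (x : α) (A B : List α)
    (h : ∀ y ∈ A, bf x y = false) :
    PySem.List.insertBy bf x (A ++ B) = A ++ PySem.List.insertBy bf x B := by
  induction A with
  | nil => simp
  | cons y ys ih =>
    have hy : bf x y = false := h y (List.mem_cons_self ..)
    simp [PySem.List.insertBy, hy, ih (fun z hz => h z (List.mem_cons_of_mem _ hz))]

theorem pv_insertBy_sorted (x : Int × Int) (L : List (Int × Int))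
    (h : L.Pairwise (fun a b => pvLexLt b a = false)) :
    (PySem.List.insertBy pvLexLt x L).Pairwise (fun a b => pvLexLt b a = false) := by
  induction L with
  | nil => simp [PySem.List.insertBy]
  | cons y ys ih =>
    rcases List.pairwise_cons.mp h with ⟨hy, hys⟩
    by_cases hk : pvLexLt x y = true
    · rw [show PySem.List.insertBy pvLexLt x (y :: ys) = x :: y :: ys from by
        simp [PySem.List.insertBy, hk]]
      refine List.pairwise_cons.mpr ⟨?_, h⟩
      intro z hz
      rcases List.mem_cons.mp hz with rfl | hz'
      · exact pvLexLt_asymm hk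
      · by_cases hzx : pvLexLt z x = true
        · exact absurd (pvLexLt_trans hzx hk) (by rw [hy z hz']; simp)
        · simpa using hzx
    · rw [show PySem.List.insertBy pvLexLt x (y :: ys) = y :: PySem.List.insertBy pvLexLt x ys from by
        simp [PySem.List.insertBy, hk]]
      refine List.pairwise_cons.mpr ⟨?_, ih hys⟩
      intro z hz
      rcases (PySem.List.mem_insertBy _ _ _ _).mp hz with rfl | hz'
      · simpa using hk
      · exact hy z hz'

-- left-fold insertion sort with the lexicographic key (f n, n)
def pvSortK (f : Int → Int) (ks : List Int) : List (Int × Int) :=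
  ks.foldl (fun acc n => PySem.List.insertBy pvLexLt (f n, n) acc) []

theorem pvSortK_inv (f : Int → Int) (ks : List Int) (h : ks.Pairwise (· < ·)) :
    (pvSortK f ks).Pairwise (fun a b => pvLexLt b a = false) ∧
      (∀ p ∈ pvSortK f ks, ∃ m ∈ ks, p = (f m, m)) := by
  induction ks using List.reverseRecOn with
  | nil => simp [pvSortK]
  | append_singleton ks n ih =>
    have hp := (List.pairwise_append.mp h).1
    obtain ⟨hs, hm⟩ := ih hp
    have heq : pvSortK f (ks ++ [n]) = PySem.List.insertBy pvLexLt (f n, n) (pvSortK f ks) := by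
      simp [pvSortK]
    constructor
    · rw [heq]; exact pv_insertBy_sorted _ _ hs
    · intro p hp'
      rw [heq] at hp'
      rcases (PySem.List.mem_insertBy _ _ _ _).mp hp' with rfl | hp''
      · exact ⟨n, by simp, rfl⟩
      · obtain ⟨m, hm', rfl⟩ := hm p hp''
        exact ⟨m, by simp [hm'], rfl⟩

theorem pv_map_snd_insertBy (f : Int → Int) (n : Int) (L : List (Int × Int))
    (hL : ∀ p ∈ L, p.2 < n ∧ p.1 = f p.2) :
    (PySem.List.insertBy pvLexLt (f n, n) L).map (·.2) =
      PySem.List.insertBy (fun a b => decide (f a < f b)) n (L.map (·.2)) := by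
  induction L with
  | nil => simp [PySem.List.insertBy]
  | cons y ys ih =>
    obtain ⟨hy2, hy1⟩ := hL y (List.mem_cons_self ..)
    have hkey : pvLexLt (f n, n) y = decide (f n < f y.2) := by
      obtain ⟨y1, y2⟩ := y
      simp_all [pvLexLt]
      omega
    by_cases hc : f n < f y.2
    · simp [PySem.List.insertBy, hkey, hc]
    · simp [PySem.List.insertBy, hkey, hc]
      exact ih (fun p hp => hL p (List.mem_cons_of_mem _ hp))

theorem pv_stab (f : Int → Int) (ks : List Int) (h : ks.Pairwise (· < ·)) :
    (pvSortK f ks).map (·.2) = PySem.List.sorted ks (fun x => f x) := by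
  induction ks using List.reverseRecOn with
  | nil => simp [pvSortK, PySem.List.sorted]
  | append_singleton ks n ih =>
    rcases List.pairwise_append.mp h with ⟨hp, _, hlt⟩
    have hmem := (pvSortK_inv f ks hp).2
    have heq : pvSortK f (ks ++ [n]) = PySem.List.insertBy pvLexLt (f n, n) (pvSortK f ks) := by
      simp [pvSortK]
    rw [heq, pv_map_snd_insertBy f n _ ?hL, ih hp,
      PySem.List.sorted_eq_foldl_insertBy, PySem.List.sorted_eq_foldl_insertBy,
      List.foldl_append]
    case hL =>
      intro p hp'
      obtain ⟨m, hm, rfl⟩ := hmem p hp'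
      exact ⟨hlt m hm n (by simp), rfl⟩
    simp

-- a member of every pairwise-related list relates to (or equals) its last element
theorem pv_pairwise_getLast {α : Type} (P : α → α → Prop) (L : List α) (h : L.Pairwise P)
    (hne : L ≠ []) : ∀ y ∈ L, y = L.getLast hne ∨ P y (L.getLast hne) := by
  induction L with
  | nil => simp at hne
  | cons a l ih =>
    rcases List.pairwise_cons.mp h with ⟨ha, hl⟩
    intro y hy
    cases l with
    | nil => simp at hy; simp [hy]
    | cons b t =>
      have hlne : b :: t ≠ [] := by simp
      have hlast : (a :: b :: t).getLast hne = (b :: t).getLast hlne := List.getLast_cons hlne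
      rcases List.mem_cons.mp hy with rfl | hy'
      · right; rw [hlast]; exact ha _ (List.getLast_mem hlne)
      · rw [hlast]; exact ih hl hlne y hy'

-- one step of B's loop is truncated sorted insertion
theorem pv_step_take (key : Int × Int) (L : List (Int × Int))
    (hs : L.Pairwise (fun a b => pvLexLt b a = false))
    (hne : ∀ p ∈ L, p ≠ key) :
    (if (L.take 6).length < 6 || pvLexLt key (PySem.List.pyGetD (L.take 6) (-1) (0, 0)) then
        (pvInsAsc key (L.take 6)).take 6
      else L.take 6) = (PySem.List.insertBy pvLexLt key L).take 6 := by
  by_cases hlen : L.length < 6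
  · have hT : L.take 6 = L := List.take_of_length_le (by omega)
    rw [hT]
    simp only [hlen, decide_true, Bool.true_or, if_true]
    rw [pvInsAsc_eq_insertBy key L hne]
  · -- L = T ++ R with |T| = 6
    set T := L.take 6 with hTdef
    have hTlen : T.length = 6 := by simp [hTdef]; omega
    have hTne : T ≠ [] := by intro h; rw [h] at hTlen; simp at hTlen
    have hTR : T ++ L.drop 6 = L := List.take_append_drop 6 L
    have hTsub : ∀ p ∈ T, p ∈ L := fun p hp => by
      rw [← hTR]; exact List.mem_append_left _ hp
    have hTsort : T.Pairwise (fun a b => pvLexLt b a = false) :=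
      hs.sublist (List.take_sublist 6 L)
    have hlast : PySem.List.pyGetD T (-1) (0, 0) = T.getLast hTne :=
      PySem.List.pyGetD_neg_one _ _ hTne
    by_cases hk : pvLexLt key (T.getLast hTne) = true
    · -- insertion lands in the first 6 positions
      have h1 : pvInsAsc key T = PySem.List.insertBy pvLexLt key T :=
        pvInsAsc_eq_insertBy key T (fun p hp => hne p (hTsub p hp))
      have h2 : PySem.List.insertBy pvLexLt key L =
          PySem.List.insertBy pvLexLt key T ++ L.drop 6 := by
        conv_lhs => rw [← hTR]
        exact pv_insertBy_append_left pvLexLt key T _ ⟨_, List.getLast_mem hTne, hk⟩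
      rw [if_pos (by simp [hTlen, hlast, hk]), h1, h2,
        List.take_append_of_le_length (by rw [pv_length_insertBy]; omega)]
    · -- key belongs after the first 6 elements: the buffer is unchanged
      have hall : ∀ y ∈ T, pvLexLt key y = false := by
        intro y hy
        by_contra hky
        have hky : pvLexLt key y = true := by simpa using hky
        rcases pv_pairwise_getLast _ T hTsort hTne y hy with rfl | hyl
        · exact absurd hky (by simpa using hk)
        · have hnel : key ≠ T.getLast hTne := fun e => hne _ (hTsub _ (List.getLast_mem hTne)) e.symm
          have h1 : pvLexLt (T.getLast hTne) key = true :=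
            pvLexLt_total hnel (by simpa using hk)
          exact absurd (pvLexLt_trans h1 hky) (by simpa using hyl)
      have h2 : PySem.List.insertBy pvLexLt key L =
          T ++ PySem.List.insertBy pvLexLt key (L.drop 6) := by
        conv_lhs => rw [← hTR]
        exact pv_insertBy_append_right pvLexLt key T _ hall
      rw [if_neg (by simp [hTlen, hlast, hk]), h2,
        List.take_append_of_le_length (by omega), List.take_of_length_le (by omega)]

-- B's whole loop equals take 6 of the insertion sort
theorem pv_trunc (f : Int → Int) (ks : List Int) (h : ks.Pairwise (· < ·)) :
    ks.foldl (fun best n =>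
        if best.length < 6 || pvLexLt (f n, n) (PySem.List.pyGetD best (-1) (0, 0)) then
          (pvInsAsc (f n, n) best).take 6
        else best) [] = (pvSortK f ks).take 6 := by
  induction ks using List.reverseRecOn with
  | nil => simp [pvSortK]
  | append_singleton ks n ih =>
    rcases List.pairwise_append.mp h with ⟨hp, _, hlt⟩
    have hmem := (pvSortK_inv f ks hp).2
    have hsort := (pvSortK_inv f ks hp).1
    have hne : ∀ p ∈ pvSortK f ks, p ≠ (f n, n) := by
      intro p hp' he
      obtain ⟨m, hm, rfl⟩ := hmem p hp'
      have := hlt m hm n (by simp)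
      have : m = n := congrArg Prod.snd he
      omega
    rw [List.foldl_append, ih hp, List.foldl_cons, List.foldl_nil,
      pv_step_take (f n, n) (pvSortK f ks) hsort hne]
    simp [pvSortK]

-- skipping via `continue` is a fold over the filtered list
theorem pv_foldl_skip {α β : Type} (p : α → Bool) (g : β → α → β) (l : List α) (init : β) :
    l.foldl (fun acc x => if p x then acc else g acc x) init =
      (l.filter (fun x => !p x)).foldl g init := by
  rw [← PySem.List.foldl_if_eq_foldl_filter (fun x => !p x) g l init]
  apply PySem.List.foldl_congr_mem
  intro acc x _
  cases p x <;> simp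

-- proof-side abbreviations for the shared pieces of both ports
def pvF (history : List (List (String × List Int))) : Int → Int := fun n =>
  (PySem.Dict.counter ((PySem.List.slice history (some (-100)) none).flatMap
    (fun d => (PySem.Dict.mk d).getD "numbers" []))).getD n 0

def pvCands (max_num : Int) (exclude : Option (List Int)) : List Int :=
  (PySem.List.pyRange 1 (max_num + 1) 1).filter (fun n => !((exclude.getD []).contains n))

-- ===== VERDICT (by name: the statement is the Claim_ definition above) =====
theorem ts3_cold_bet_py_spec : Claim_equal_ts3_cold_bet_py := by
  intro history max_num exclude _ _
  unfold Spec_ts3_cold_bet_py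
  have hpw : (pvCands max_num exclude).Pairwise (· < ·) :=
    (PySem.List.pairwise_lt_pyRange_one 1 (max_num + 1)).filter _
  have eB : ts3_cold_bet_py_alt history max_num exclude =
      PySem.List.sorted (((pvSortK (pvF history) (pvCands max_num exclude)).take 6).map (·.2))
        (fun x => x) := by
    have e1 := pv_foldl_skip (fun n => (exclude.getD []).contains n)
      (fun best n =>
        if best.length < 6 || pvLexLt (pvF history n, n) (PySem.List.pyGetD best (-1) (0, 0)) then
          (pvInsAsc (pvF history n, n) best).take 6
        else best)
      (PySem.List.pyRange 1 (max_num + 1) 1) []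
    have e2 := pv_trunc (pvF history) (pvCands max_num exclude) hpw
    exact congrArg (fun l => PySem.List.sorted (l.map (·.2)) (fun x => x)) (e1.trans e2)
  have e4 := pv_stab (pvF history) (pvCands max_num exclude) hpw
  have e3 : PySem.List.slice
      (PySem.List.sorted (pvCands max_num exclude) (fun x => pvF history x)) none (some 6) =
      (PySem.List.sorted (pvCands max_num exclude) (fun x => pvF history x)).take 6 :=
    PySem.List.slice_to _ (by norm_num)
  have eA : ts3_cold_bet_py history max_num exclude =
      PySem.List.sorted (((pvSortK (pvF history) (pvCands max_num exclude)).map (·.2)).take 6)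
        (fun x => x) :=
    congrArg (fun l => PySem.List.sorted l (fun x => x))
      (e3.trans (congrArg (fun l => List.take 6 l) e4.symm))
  rw [eA, eB, List.map_take]
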